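-- pv_equiv track=rewrite | github.com/pseudostate/ctf | 2025/ctf@cit_2025/crypto/rotten/rotten.py | solution
-- ===== SOURCE A (Python) =====
-- def decode_rot(cipher_text: str, n: int = 13) -> str:
--     plain_text = ""
--     for c in cipher_text:
--         if "A" <= c <= "Z":
--             plain_text += chr((ord(c) - ord("A") + n) % 26 + ord("A"))
--         elif "a" <= c <= "z":
--             plain_text += chr((ord(c) - ord("a") + n) % 26 + ord("a"))
--         else:
--             plain_text += c
--     return plain_text
--
-- def solution(cipher_text: str, prefix: str) -> str:
--     flag = ""
--     for n in range(26):
--         plain_text = decode_rot(cipher_text, n)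
--         if plain_text.upper().startswith(prefix):
--             flag = plain_text
--             break
--     return flag
-- ===== SOURCE B (Python) =====
-- def solution(cipher_text, prefix):
--     # Derive the unique candidate rotation algebraically from the first letter
--     # in the prefix window, verify it once, and decode once -- no 26-way loop.
--     if len(prefix) > len(cipher_text):
--         return ""
--     pairs = list(zip(cipher_text, prefix))
--     n = 0
--     for c, p in pairs:
--         if "A" <= c <= "Z" or "a" <= c <= "z":
--             if not ("A" <= p <= "Z"):
--                 return ""
--             n = (ord(p) - ord(c.upper())) % 26
--             break
--     for c, p in pairs:
--         if "A" <= c <= "Z":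
--             if chr((ord(c) - 65 + n) % 26 + 65) != p:
--                 return ""
--         elif "a" <= c <= "z":
--             if chr((ord(c) - 97 + n) % 26 + 65) != p:
--                 return ""
--         elif c != p:
--             return ""
--     out = []
--     for c in cipher_text:
--         if "A" <= c <= "Z":
--             out.append(chr((ord(c) - 65 + n) % 26 + 65))
--         elif "a" <= c <= "z":
--             out.append(chr((ord(c) - 97 + n) % 26 + 97))
--         else:
--             out.append(c)
--     return "".join(out)
-- ===== Notes on version B (the rewrite author's own statement) =====
-- stated objective: faster
-- what changed: B replaces A's brute force over all 26 rotations (each doing a full decode and full-string upper) by deriving the unique candidate shift algebraically from the first letter in the prefix window, verifying that single shift against the prefix once, and decoding the whole text exactly once.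
import Mathlib
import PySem

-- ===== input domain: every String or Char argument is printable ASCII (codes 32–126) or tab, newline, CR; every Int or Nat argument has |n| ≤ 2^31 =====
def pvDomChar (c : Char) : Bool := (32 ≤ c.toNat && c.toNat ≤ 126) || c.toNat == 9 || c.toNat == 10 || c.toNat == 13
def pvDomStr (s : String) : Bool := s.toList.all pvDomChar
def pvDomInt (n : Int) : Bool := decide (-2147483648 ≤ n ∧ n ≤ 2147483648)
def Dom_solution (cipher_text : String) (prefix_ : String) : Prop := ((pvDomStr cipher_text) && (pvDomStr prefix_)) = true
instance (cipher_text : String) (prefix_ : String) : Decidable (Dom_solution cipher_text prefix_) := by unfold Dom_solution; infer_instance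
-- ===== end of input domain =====

-- B derives the unique candidate rotation algebraically from the first letter in the
-- prefix window, verifies it once and decodes once, instead of A's 26-way brute force.

-- ===== PORT A =====
def decode_rot (cipher_text : String) (n : Int) : String :=
  String.ofList (cipher_text.toList.foldl (fun plain c =>
    if 'A' ≤ c ∧ c ≤ 'Z' then
      plain ++ [Char.ofNat ((PySem.Int.mod ((c.toNat : Int) - 65 + n) 26 + 65).toNat)]
    else if 'a' ≤ c ∧ c ≤ 'z' then
      plain ++ [Char.ofNat ((PySem.Int.mod ((c.toNat : Int) - 97 + n) 26 + 97).toNat)]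
    else
      plain ++ [c]) [])

def solutionLoop (cipher_text : String) (prefix_ : String) : List Int → String
  | [] => ""
  | n :: ns =>
    let plain_text := decode_rot cipher_text n
    if PySem.Str.startswith (PySem.Str.upper plain_text) prefix_ then plain_text
    else solutionLoop cipher_text prefix_ ns

def solution (cipher_text : String) (prefix_ : String) : String :=
  solutionLoop cipher_text prefix_ (PySem.List.pyRange 0 26 1)

-- ===== PORT B =====
def rotB (c : Char) (n : Int) : Char :=
  if 'A' ≤ c ∧ c ≤ 'Z' then Char.ofNat ((PySem.Int.mod ((c.toNat : Int) - 65 + n) 26 + 65).toNat)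
  else if 'a' ≤ c ∧ c ≤ 'z' then Char.ofNat ((PySem.Int.mod ((c.toNat : Int) - 97 + n) 26 + 97).toNat)
  else c

-- first loop of Source B: the candidate shift from the first letter of the prefix window
-- (none = Source B's early `return ""` when the matching prefix char is not an uppercase letter)
def findShift : List (Char × Char) → Option Int
  | [] => some 0
  | (c, p) :: rest =>
    if ('A' ≤ c ∧ c ≤ 'Z') ∨ ('a' ≤ c ∧ c ≤ 'z') then
      if 'A' ≤ p ∧ p ≤ 'Z' then
        some (PySem.Int.mod ((p.toNat : Int) - ((PySem.Chars.upperChar c).toNat : Int)) 26)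
      else none
    else findShift rest

-- one step of Source B's verification loop
def checkPair (c p : Char) (n : Int) : Bool :=
  if 'A' ≤ c ∧ c ≤ 'Z' then
    Char.ofNat ((PySem.Int.mod ((c.toNat : Int) - 65 + n) 26 + 65).toNat) == p
  else if 'a' ≤ c ∧ c ≤ 'z' then
    Char.ofNat ((PySem.Int.mod ((c.toNat : Int) - 97 + n) 26 + 65).toNat) == p
  else c == p

def solution_alt (cipher_text : String) (prefix_ : String) : String :=
  if prefix_.toList.length > cipher_text.toList.length then ""
  else
    match findShift (cipher_text.toList.zip prefix_.toList) with
    | none => ""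
    | some n =>
      if (cipher_text.toList.zip prefix_.toList).all (fun cp => checkPair cp.1 cp.2 n) then
        String.ofList (cipher_text.toList.map (fun c => rotB c n))
      else ""

-- ===== PRECONDITION & SPEC =====
def Spec_solution (cipher_text : String) (prefix_ : String) (out : String) : Prop := out = solution_alt cipher_text prefix_
instance (cipher_text : String) (prefix_ : String) (out : String) : Decidable (Spec_solution cipher_text prefix_ out) := by unfold Spec_solution; infer_instance

-- ===== CLAIM (what is proved, stated in full; the proofs are below) =====
def Claim_equal_solution : Prop := ∀ (cipher_text : String) (prefix_ : String), Dom_solution cipher_text prefix_ → Spec_solution cipher_text prefix_ (solution cipher_text prefix_)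

-- ===== LEMMAS AND PROOFS =====

theorem decode_rot_aux (n : Int) :
    ∀ (l : List Char) (a : List Char),
      l.foldl (fun plain c =>
        if 'A' ≤ c ∧ c ≤ 'Z' then
          plain ++ [Char.ofNat ((PySem.Int.mod ((c.toNat : Int) - 65 + n) 26 + 65).toNat)]
        else if 'a' ≤ c ∧ c ≤ 'z' then
          plain ++ [Char.ofNat ((PySem.Int.mod ((c.toNat : Int) - 97 + n) 26 + 97).toNat)]
        else
          plain ++ [c]) a = a ++ l.map (fun c => rotB c n) := by
  intro l
  induction l with
  | nil => simp
  | cons c cs ih =>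
    intro a
    simp only [List.foldl_cons, List.map_cons]
    by_cases h1 : 'A' ≤ c ∧ c ≤ 'Z'
    · rw [if_pos h1, ih]; simp [rotB, h1]
    · by_cases h2 : 'a' ≤ c ∧ c ≤ 'z'
      · rw [if_neg h1, if_pos h2, ih]; simp [rotB, h1, h2]
      · rw [if_neg h1, if_neg h2, ih]; simp [rotB, h1, h2]

theorem decode_rot_eq_map (cipher_text : String) (n : Int) :
    decode_rot cipher_text n = String.ofList (cipher_text.toList.map (fun c => rotB c n)) := by
  unfold decode_rot
  rw [decode_rot_aux n cipher_text.toList []]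
  rfl

-- basic Char facts
theorem char_le_iff (a b : Char) : a ≤ b ↔ a.toNat ≤ b.toNat := by
  rfl

theorem toNat_ofNat_small {k : Nat} (h : k < 55296) : (Char.ofNat k).toNat = k := by
  rw [Char.toNat_ofNat, if_pos]
  exact Or.inl h

theorem mod26_eq (a : Int) : PySem.Int.mod a 26 = a % 26 := by
  simp [PySem.Int.mod, Int.fmod_eq_emod]

-- upperChar on character codes in the relevant windows
theorem upperChar_ofNat_upper {k : Nat} (h1 : 65 ≤ k) (h2 : k ≤ 90) :
    PySem.Chars.upperChar (Char.ofNat k) = Char.ofNat k := by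
  have ht : (Char.ofNat k).toNat = k := toNat_ofNat_small (by omega)
  have ha : ('a' : Char).toNat = 97 := rfl
  have hlow : PySem.Chars.islower (Char.ofNat k) = false := by
    simp only [PySem.Chars.islower, Bool.and_eq_false_iff]
    left
    simp only [decide_eq_false_iff_not, char_le_iff, ht, ha]
    omega
  simp [PySem.Chars.upperChar, hlow]

theorem upperChar_ofNat_lower {k : Nat} (h1 : 97 ≤ k) (h2 : k ≤ 122) :
    PySem.Chars.upperChar (Char.ofNat k) = Char.ofNat (k - 32) := by
  have ht : (Char.ofNat k).toNat = k := toNat_ofNat_small (by omega)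
  have ha : ('a' : Char).toNat = 97 := rfl
  have hz : ('z' : Char).toNat = 122 := rfl
  have hlow : PySem.Chars.islower (Char.ofNat k) = true := by
    simp only [PySem.Chars.islower, Bool.and_eq_true, decide_eq_true_eq, char_le_iff, ht, ha, hz]
    omega
  simp [PySem.Chars.upperChar, hlow, ht]

theorem upperChar_nonalpha (c : Char) (h : ¬ ('a' ≤ c ∧ c ≤ 'z')) :
    PySem.Chars.upperChar c = c := by
  have hlow : PySem.Chars.islower c = false := by
    simp only [PySem.Chars.islower, Bool.and_eq_false_iff]
    by_cases ha : 'a' ≤ c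
    · right; simp only [decide_eq_false_iff_not]; intro hb; exact h ⟨ha, hb⟩
    · left; simp only [decide_eq_false_iff_not]; exact ha
  simp [PySem.Chars.upperChar, hlow]

-- the per-character test A performs equals B's checkPair
theorem perChar_eq_checkPair (c p : Char) (n : Int) :
    (PySem.Chars.upperChar (rotB c n) == p) = checkPair c p n := by
  unfold rotB checkPair
  by_cases h1 : 'A' ≤ c ∧ c ≤ 'Z'
  · rw [if_pos h1, if_pos h1]
    have hm0 : 0 ≤ PySem.Int.mod ((c.toNat : Int) - 65 + n) 26 := by
      rw [mod26_eq]; exact Int.emod_nonneg _ (by norm_num)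
    have hm1 : PySem.Int.mod ((c.toNat : Int) - 65 + n) 26 < 26 := by
      rw [mod26_eq]; exact Int.emod_lt_of_pos _ (by norm_num)
    rw [upperChar_ofNat_upper (by omega) (by omega)]
  · rw [if_neg h1, if_neg h1]
    by_cases h2 : 'a' ≤ c ∧ c ≤ 'z'
    · rw [if_pos h2, if_pos h2]
      have hm0 : 0 ≤ PySem.Int.mod ((c.toNat : Int) - 97 + n) 26 := by
        rw [mod26_eq]; exact Int.emod_nonneg _ (by norm_num)
      have hm1 : PySem.Int.mod ((c.toNat : Int) - 97 + n) 26 < 26 := by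
        rw [mod26_eq]; exact Int.emod_lt_of_pos _ (by norm_num)
      rw [upperChar_ofNat_lower (by omega) (by omega)]
      congr 2
      omega
    · rw [if_neg h2, if_neg h2]
      have hA : ('A' : Char).toNat = 65 := rfl
      rw [upperChar_nonalpha c h2]

-- prefix test via zip (A's startswith unfolded)
theorem prefix_iff_zip :
    ∀ (p a : List Char), p <+: a ↔
      (p.length ≤ a.length ∧ (a.zip p).all (fun cp => cp.1 == cp.2) = true) := by
  intro p
  induction p with
  | nil => intro a; simp
  | cons x xs ih =>
    intro a
    cases a with
    | nil => simp
    | cons y ys =>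
      constructor
      · intro h
        rcases h with ⟨t, ht⟩
        injection ht with h1 h2
        subst h1
        have := (ih ys).1 ⟨t, h2⟩
        simpa using this
      · intro h
        simp only [List.zip_cons_cons, List.all_cons, List.length_cons] at h
        obtain ⟨hl, hb⟩ := h
        simp only [Bool.and_eq_true, beq_iff_eq] at hb
        obtain ⟨hxy, hrest⟩ := hb
        subst hxy
        have : xs <+: ys := (ih ys).2 ⟨by omega, by simpa using hrest⟩
        rcases this with ⟨t, ht⟩
        exact ⟨t, by simp [ht]⟩

-- all over a zip with a mapped left component
theorem zip_map_all (f : Char → Char) :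
    ∀ (l l' : List Char),
      ((l.map f).zip l').all (fun cp => cp.1 == cp.2)
        = (l.zip l').all (fun cp => f cp.1 == cp.2) := by
  intro l
  induction l with
  | nil => intro l'; simp
  | cons x xs ih =>
    intro l'
    cases l' with
    | nil => simp
    | cons y ys => simp [ih]

-- A's per-n test equals "length fits and every zipped pair passes checkPair"
theorem test_eq (cipher_text : String) (prefix_ : String) (n : Int) :
    (PySem.Str.startswith (PySem.Str.upper (decode_rot cipher_text n)) prefix_ = true) ↔
    (prefix_.toList.length ≤ cipher_text.toList.length ∧
      (cipher_text.toList.zip prefix_.toList).all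
        (fun cp => checkPair cp.1 cp.2 n) = true) := by
  rw [decode_rot_eq_map]
  rw [show (PySem.Str.startswith (PySem.Str.upper (String.ofList (cipher_text.toList.map (fun c => rotB c n)))) prefix_
        = PySem.Chars.startswith (PySem.Chars.upper (cipher_text.toList.map (fun c => rotB c n))) prefix_.toList) by
    simp]
  rw [PySem.Chars.startswith_iff]
  rw [prefix_iff_zip]
  have hupper : PySem.Chars.upper (cipher_text.toList.map (fun c => rotB c n))
      = cipher_text.toList.map (fun c => PySem.Chars.upperChar (rotB c n)) := by
    simp [PySem.Chars.upper, List.map_map]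
  rw [hupper, zip_map_all, List.length_map]
  simp only [perChar_eq_checkPair]

-- a passing uppercase/lowercase pair pins n modulo 26 to the algebraic shift
theorem check_upper_shift (c p : Char) (n : Int) (hc : 'A' ≤ c ∧ c ≤ 'Z')
    (h : checkPair c p n = true) :
    ('A' ≤ p ∧ p ≤ 'Z') ∧
    n % 26 = PySem.Int.mod ((p.toNat : Int) - ((PySem.Chars.upperChar c).toNat : Int)) 26 := by
  have hc' : 65 ≤ c.toNat ∧ c.toNat ≤ 90 := by
    rcases hc with ⟨hA, hZ⟩
    exact ⟨hA, hZ⟩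
  unfold checkPair at h
  rw [if_pos hc] at h
  rw [beq_iff_eq] at h
  have hm0 : 0 ≤ ((c.toNat : Int) - 65 + n) % 26 := Int.emod_nonneg _ (by norm_num)
  have hm1 : ((c.toNat : Int) - 65 + n) % 26 < 26 := Int.emod_lt_of_pos _ (by norm_num)
  rw [mod26_eq] at h
  have hp : p.toNat = (((c.toNat : Int) - 65 + n) % 26 + 65).toNat := by
    rw [← h, toNat_ofNat_small (by omega)]
  have hlow : PySem.Chars.islower c = false := by
    simp only [PySem.Chars.islower, Bool.and_eq_false_iff]
    left
    simp only [decide_eq_false_iff_not, char_le_iff]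
    show ¬ (97 ≤ _)
    omega
  have huc : (PySem.Chars.upperChar c).toNat = c.toNat := by
    simp [PySem.Chars.upperChar, hlow]
  constructor
  · constructor
    · show 65 ≤ p.toNat; omega
    · show p.toNat ≤ 90; omega
  · rw [mod26_eq, huc]
    have hpi : (p.toNat : Int) = ((c.toNat : Int) - 65 + n) % 26 + 65 := by omega
    rw [hpi]
    omega

theorem check_lower_shift (c p : Char) (n : Int) (hc : 'a' ≤ c ∧ c ≤ 'z')
    (h : checkPair c p n = true) :
    ('A' ≤ p ∧ p ≤ 'Z') ∧
    n % 26 = PySem.Int.mod ((p.toNat : Int) - ((PySem.Chars.upperChar c).toNat : Int)) 26 := by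
  have hc' : 97 ≤ c.toNat ∧ c.toNat ≤ 122 := by
    rcases hc with ⟨hA, hZ⟩
    exact ⟨hA, hZ⟩
  have hcu : ¬ ('A' ≤ c ∧ c ≤ 'Z') := by
    intro hx
    have : c.toNat ≤ 90 := hx.2
    omega
  unfold checkPair at h
  rw [if_neg hcu, if_pos hc] at h
  rw [beq_iff_eq] at h
  have hm0 : 0 ≤ ((c.toNat : Int) - 97 + n) % 26 := Int.emod_nonneg _ (by norm_num)
  have hm1 : ((c.toNat : Int) - 97 + n) % 26 < 26 := Int.emod_lt_of_pos _ (by norm_num)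
  rw [mod26_eq] at h
  have hp : p.toNat = (((c.toNat : Int) - 97 + n) % 26 + 65).toNat := by
    rw [← h, toNat_ofNat_small (by omega)]
  have hlow : PySem.Chars.islower c = true := by
    simp only [PySem.Chars.islower, Bool.and_eq_true, decide_eq_true_eq, char_le_iff]
    exact ⟨hc'.1, hc'.2⟩
  have huc : (PySem.Chars.upperChar c).toNat = c.toNat - 32 := by
    simp only [PySem.Chars.upperChar, hlow, if_pos]
    rw [toNat_ofNat_small (by omega)]
  constructor
  · constructor
    · show 65 ≤ p.toNat; omega
    · show p.toNat ≤ 90; omega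
  · rw [mod26_eq, huc]
    have hpi : (p.toNat : Int) = ((c.toNat : Int) - 97 + n) % 26 + 65 := by omega
    have hci : ((c.toNat - 32 : Nat) : Int) = (c.toNat : Int) - 32 := by omega
    rw [hpi, hci]
    omega

-- an alphabetic pair whose prefix char is not an uppercase letter never passes
theorem check_alpha_bad (c p : Char) (n : Int)
    (hc : ('A' ≤ c ∧ c ≤ 'Z') ∨ ('a' ≤ c ∧ c ≤ 'z'))
    (hp : ¬ ('A' ≤ p ∧ p ≤ 'Z')) : checkPair c p n = false := by
  by_contra hne
  rw [Bool.not_eq_false] at hne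
  rcases hc with hcu | hcl
  · exact hp (check_upper_shift c p n hcu hne).1
  · exact hp (check_lower_shift c p n hcl hne).1

-- a non-alphabetic pair's test does not depend on n
theorem check_nonalpha (c p : Char) (n m : Int)
    (hc : ¬ (('A' ≤ c ∧ c ≤ 'Z') ∨ ('a' ≤ c ∧ c ≤ 'z'))) :
    checkPair c p n = checkPair c p m := by
  have h1 : ¬ ('A' ≤ c ∧ c ≤ 'Z') := fun h => hc (Or.inl h)
  have h2 : ¬ ('a' ≤ c ∧ c ≤ 'z') := fun h => hc (Or.inr h)
  unfold checkPair
  rw [if_neg h1, if_neg h2, if_neg h1, if_neg h2]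

-- findShift = none ⟹ no rotation passes the verification
theorem findShift_none :
    ∀ (z : List (Char × Char)), findShift z = none →
      ∀ n : Int, z.all (fun cp => checkPair cp.1 cp.2 n) = false := by
  intro z
  induction z with
  | nil => intro h; simp [findShift] at h
  | cons cp rest ih =>
    intro h n
    obtain ⟨c, p⟩ := cp
    unfold findShift at h
    by_cases hα : ('A' ≤ c ∧ c ≤ 'Z') ∨ ('a' ≤ c ∧ c ≤ 'z')
    · rw [if_pos hα] at h
      by_cases hp : 'A' ≤ p ∧ p ≤ 'Z'
      · rw [if_pos hp] at h; exact absurd h (by simp)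
      · simp only [List.all_cons, Bool.and_eq_false_iff]
        left
        exact check_alpha_bad c p n hα hp
    · rw [if_neg hα] at h
      simp only [List.all_cons, Bool.and_eq_false_iff]
      right
      exact ih h n

-- findShift = some n0 ⟹ either no letter occurred (n0 = 0, test independent of n)
-- or n0 is the unique rotation in [0,26) that can pass
theorem findShift_some :
    ∀ (z : List (Char × Char)) (n0 : Int), findShift z = some n0 →
      (n0 = 0 ∧ ∀ n : Int, z.all (fun cp => checkPair cp.1 cp.2 n)
          = z.all (fun cp => checkPair cp.1 cp.2 0)) ∨
      (0 ≤ n0 ∧ n0 < 26 ∧ ∀ n : Int, 0 ≤ n → n < 26 →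
          z.all (fun cp => checkPair cp.1 cp.2 n) = true → n = n0) := by
  intro z
  induction z with
  | nil =>
    intro n0 h
    left
    simp only [findShift, Option.some_inj] at h
    exact ⟨h.symm, fun n => rfl⟩
  | cons cp rest ih =>
    intro n0 h
    obtain ⟨c, p⟩ := cp
    unfold findShift at h
    by_cases hα : ('A' ≤ c ∧ c ≤ 'Z') ∨ ('a' ≤ c ∧ c ≤ 'z')
    · rw [if_pos hα] at h
      by_cases hp : 'A' ≤ p ∧ p ≤ 'Z'
      · rw [if_pos hp, Option.some_inj] at h
        right
        have h0 : 0 ≤ n0 := by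
          rw [← h, mod26_eq]; exact Int.emod_nonneg _ (by norm_num)
        have h1 : n0 < 26 := by
          rw [← h, mod26_eq]; exact Int.emod_lt_of_pos _ (by norm_num)
        refine ⟨h0, h1, ?_⟩
        intro n hn0 hn1 hall
        simp only [List.all_cons, Bool.and_eq_true] at hall
        have hmod : n % 26 = PySem.Int.mod ((p.toNat : Int) - ((PySem.Chars.upperChar c).toNat : Int)) 26 := by
          rcases hα with hcu | hcl
          · exact (check_upper_shift c p n hcu hall.1).2
          · exact (check_lower_shift c p n hcl hall.1).2
        rw [h] at hmod
        omega
      · rw [if_neg hp] at h; exact absurd h (by simp)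
    · rw [if_neg hα] at h
      rcases ih n0 h with ⟨hz, hind⟩ | ⟨h0, h1, huniq⟩
      · left
        refine ⟨hz, ?_⟩
        intro n
        simp only [List.all_cons]
        rw [check_nonalpha c p n 0 hα, hind n]
      · right
        refine ⟨h0, h1, ?_⟩
        intro n hn0 hn1 hall
        simp only [List.all_cons, Bool.and_eq_true] at hall
        exact huniq n hn0 hn1 hall.2

-- A's loop is a first-match search over the candidate list
theorem loop_eq_find (cipher_text : String) (prefix_ : String) :
    ∀ (ns : List Int),
      solutionLoop cipher_text prefix_ ns =
        (match ns.find? (fun n => PySem.Str.startswith (PySem.Str.upper (decode_rot cipher_text n)) prefix_) with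
          | none => ""
          | some n => decode_rot cipher_text n) := by
  intro ns
  induction ns with
  | nil => rfl
  | cons n ns ih =>
    rw [solutionLoop]
    by_cases h : PySem.Str.startswith (PySem.Str.upper (decode_rot cipher_text n)) prefix_ = true
    · rw [List.find?_cons_of_pos
        (p := fun m => PySem.Str.startswith (PySem.Str.upper (decode_rot cipher_text m)) prefix_)
        (by exact h), if_pos h]
    · rw [List.find?_cons_of_neg
        (p := fun m => PySem.Str.startswith (PySem.Str.upper (decode_rot cipher_text m)) prefix_)
        (by exact h), if_neg h]
      exact ih

theorem find?_of_unique {pr : Int → Bool} (n0 : Int) :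
    ∀ (ns : List Int), n0 ∈ ns → pr n0 = true → (∀ n ∈ ns, pr n = true → n = n0) →
      ns.find? pr = some n0 := by
  intro ns
  induction ns with
  | nil => intro h; simp at h
  | cons a t ih =>
    intro hmem hp huniq
    by_cases ha : pr a = true
    · have : a = n0 := huniq a (List.mem_cons_self) ha
      rw [List.find?_cons_of_pos ha, this]
    · rw [List.find?_cons_of_neg (by simpa using ha)]
      have hat : n0 ∈ t := by
        rcases List.mem_cons.mp hmem with h | h
        · exact absurd (h ▸ hp) (by rw [h] at hp; exact absurd hp ha)
        · exact h
      exact ih hat hp (fun n hn => huniq n (List.mem_cons_of_mem _ hn))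

-- ===== VERDICT (by name: the statement is the Claim_ definition above) =====
theorem solution_spec : Claim_equal_solution := by
  intro cipher_text prefix_ _
  unfold Spec_solution solution solution_alt
  rw [loop_eq_find]
  by_cases hlen : prefix_.toList.length > cipher_text.toList.length
  · rw [if_pos hlen]
    have hnone : (PySem.List.pyRange 0 26 1).find?
        (fun n => PySem.Str.startswith (PySem.Str.upper (decode_rot cipher_text n)) prefix_) = none := by
      rw [List.find?_eq_none]
      intro n _ habs
      exact absurd ((test_eq cipher_text prefix_ n).1 habs).1 (by omega)
    rw [hnone]
  · rw [if_neg hlen]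
    have hlen' : prefix_.toList.length ≤ cipher_text.toList.length := by omega
    cases hfs : findShift (cipher_text.toList.zip prefix_.toList) with
    | none =>
      have hnone : (PySem.List.pyRange 0 26 1).find?
          (fun n => PySem.Str.startswith (PySem.Str.upper (decode_rot cipher_text n)) prefix_) = none := by
        rw [List.find?_eq_none]
        intro n _ habs
        have h2 := ((test_eq cipher_text prefix_ n).1 habs).2
        rw [findShift_none _ hfs n] at h2
        cases h2
      rw [hnone]
    | some n0 =>
      rcases findShift_some _ n0 hfs with ⟨hz0, hind⟩ | ⟨h0, h1, huniq⟩
      · subst hz0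
        by_cases hall : (cipher_text.toList.zip prefix_.toList).all
            (fun cp => checkPair cp.1 cp.2 0) = true
        · have hT0 : PySem.Str.startswith (PySem.Str.upper (decode_rot cipher_text 0)) prefix_ = true :=
            (test_eq cipher_text prefix_ 0).2 ⟨hlen', hall⟩
          have hcons : PySem.List.pyRange 0 26 1 = 0 :: PySem.List.pyRange 1 26 1 := by
            simpa using PySem.List.pyRange_one_cons (a := 0) (b := 26) (by norm_num)
          have hfind : (PySem.List.pyRange 0 26 1).find?
              (fun n => PySem.Str.startswith (PySem.Str.upper (decode_rot cipher_text n)) prefix_) = some 0 := by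
            rw [hcons]
            exact List.find?_cons_of_pos
              (p := fun m => PySem.Str.startswith (PySem.Str.upper (decode_rot cipher_text m)) prefix_)
              (by exact hT0)
          rw [hfind]
          show decode_rot cipher_text 0 = _
          rw [decode_rot_eq_map]
          exact (if_pos hall).symm
        · have hnone : (PySem.List.pyRange 0 26 1).find?
              (fun n => PySem.Str.startswith (PySem.Str.upper (decode_rot cipher_text n)) prefix_) = none := by
            rw [List.find?_eq_none]
            intro n _ habs
            have h2 := ((test_eq cipher_text prefix_ n).1 habs).2
            rw [hind n] at h2
            exact hall h2
          rw [hnone]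
          exact (if_neg hall).symm
      · by_cases hall : (cipher_text.toList.zip prefix_.toList).all
            (fun cp => checkPair cp.1 cp.2 n0) = true
        · have hTn0 : PySem.Str.startswith (PySem.Str.upper (decode_rot cipher_text n0)) prefix_ = true :=
            (test_eq cipher_text prefix_ n0).2 ⟨hlen', hall⟩
          have hfind : (PySem.List.pyRange 0 26 1).find?
              (fun n => PySem.Str.startswith (PySem.Str.upper (decode_rot cipher_text n)) prefix_) = some n0 := by
            apply find?_of_unique
            · rw [PySem.List.mem_pyRange_one]; exact ⟨h0, h1⟩
            · exact hTn0
            · intro n hn hTn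
              rw [PySem.List.mem_pyRange_one] at hn
              exact huniq n hn.1 hn.2 ((test_eq cipher_text prefix_ n).1 hTn).2
          rw [hfind]
          show decode_rot cipher_text n0 = _
          rw [decode_rot_eq_map]
          exact (if_pos hall).symm
        · have hnone : (PySem.List.pyRange 0 26 1).find?
              (fun n => PySem.Str.startswith (PySem.Str.upper (decode_rot cipher_text n)) prefix_) = none := by
            rw [List.find?_eq_none]
            intro n hn habs
            rw [PySem.List.mem_pyRange_one] at hn
            have hzall := ((test_eq cipher_text prefix_ n).1 habs).2
            have heq := huniq n hn.1 hn.2 hzall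
            rw [heq] at hzall
            exact hall hzall
          rw [hnone]
          exact (if_neg hall).symm
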